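-- pv_equiv track=rewrite | github.com/hwengjp/axi_pipeline_design_guide | smart_update_qiita.py | remove_title_from_body
-- ===== SOURCE A (Python) =====
-- def remove_title_from_body(content):
--     """本文からタイトル行を削除"""
--     lines = content.split('\n')
--     new_lines = []
--     title_removed = False
--
--     for line in lines:
--         if not title_removed and line.strip().startswith('# '):
--             title_removed = True
--             continue
--         new_lines.append(line)
--
--     return '\n'.join(new_lines)
-- ===== SOURCE B (Python) =====
-- def remove_title_from_body(content):
--     """本文からタイトル行を削除"""
--     lines = content.split('\n')
--     idx = next((i for i, l in enumerate(lines) if l.strip().startswith('# ')), None)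
--     if idx is not None:
--         del lines[idx]
--     return '\n'.join(lines)
-- ===== Notes on version B (the rewrite author's own statement) =====
-- stated objective: simpler
-- what changed: Replaces the flag+accumulator single pass (boolean state threaded through every line) with a two-phase locate-then-delete: find the index of the first title line, delete exactly that element, rejoin.
import Mathlib
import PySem

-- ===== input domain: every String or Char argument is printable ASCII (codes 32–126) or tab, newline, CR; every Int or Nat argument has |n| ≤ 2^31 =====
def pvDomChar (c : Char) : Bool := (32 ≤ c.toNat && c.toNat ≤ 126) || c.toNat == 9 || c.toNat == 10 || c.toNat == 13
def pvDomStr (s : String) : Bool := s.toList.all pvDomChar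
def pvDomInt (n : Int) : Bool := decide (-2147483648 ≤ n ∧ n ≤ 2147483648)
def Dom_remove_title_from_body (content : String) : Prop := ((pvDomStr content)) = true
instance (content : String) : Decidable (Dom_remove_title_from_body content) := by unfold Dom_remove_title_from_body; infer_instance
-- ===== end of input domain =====

-- B replaces A's flag+accumulator pass with a locate-then-delete decomposition (objective: simpler).


-- ===== PORT A =====
-- A: single pass with a 'title_removed' flag; skips the first line whose strip() starts with '# '.
-- (ported at the List Char level via PySem.Chars; exact on the stated ASCII domain)
def remove_title_from_body (content : String) : String :=
  let lines := PySem.Chars.splitOn content.toList ['\n']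
  let res := lines.foldl
    (fun (st : List (List Char) × Bool) line =>
      if !st.2 && PySem.Chars.startswith (PySem.Chars.strip line) "# ".toList then
        (st.1, true)
      else
        (st.1 ++ [line], st.2))
    ([], false)
  String.ofList (PySem.Chars.join ['\n'] res.1)

-- ===== PORT B =====
-- B: find the index of the first title line; if found, delete exactly that element; rejoin.
def remove_title_from_body_alt (content : String) : String :=
  let lines := PySem.Chars.splitOn content.toList ['\n']
  let lines' :=
    match lines.findIdx? (fun l => PySem.Chars.startswith (PySem.Chars.strip l) "# ".toList) with
    | none => lines
    | some i => lines.eraseIdx i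
  String.ofList (PySem.Chars.join ['\n'] lines')

-- ===== PRECONDITION & SPEC =====
def Spec_remove_title_from_body (content : String) (out : String) : Prop := out = remove_title_from_body_alt content
instance (content : String) (out : String) : Decidable (Spec_remove_title_from_body content out) := by unfold Spec_remove_title_from_body; infer_instance

-- ===== CLAIM (what is proved, stated in full; the proofs are below) =====
def Claim_equal_remove_title_from_body : Prop := ∀ (content : String), Dom_remove_title_from_body content → Spec_remove_title_from_body content (remove_title_from_body content)

-- ===== LEMMAS AND PROOFS =====

-- once the flag is true, A's loop appends every remaining line
theorem pv_fold_true (p : List Char → Bool) (ls : List (List Char)) (acc : List (List Char)) :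
    (ls.foldl
      (fun (st : List (List Char) × Bool) line =>
        if !st.2 && p line then (st.1, true) else (st.1 ++ [line], st.2))
      (acc, true)) = (acc ++ ls, true) := by
  induction ls generalizing acc with
  | nil => simp
  | cons hd tl ih => simpa using ih (acc ++ [hd])

-- while the flag is false, A's loop computes acc ++ (delete first p-match)
theorem pv_fold_false (p : List Char → Bool) (ls : List (List Char)) (acc : List (List Char)) :
    (ls.foldl
      (fun (st : List (List Char) × Bool) line =>
        if !st.2 && p line then (st.1, true) else (st.1 ++ [line], st.2))
      (acc, false)).1 =
      acc ++ (match ls.findIdx? p with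
              | none => ls
              | some i => ls.eraseIdx i) := by
  induction ls generalizing acc with
  | nil => simp
  | cons hd tl ih =>
    by_cases h : p hd
    · simp only [List.foldl_cons, h, Bool.not_false, Bool.and_self, if_pos, pv_fold_true,
        List.findIdx?_cons]
      simp [List.eraseIdx]
    · have := ih (acc ++ [hd])
      simp only [List.foldl_cons, h, Bool.and_false, Bool.not_false, if_neg,
        Bool.false_eq_true, not_false_eq_true, this, List.findIdx?_cons]
      cases htl : tl.findIdx? p with
      | none => simp
      | some i => simp [List.eraseIdx]

-- ===== VERDICT (by name: the statement is the Claim_ definition above) =====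
theorem remove_title_from_body_spec : Claim_equal_remove_title_from_body := by
  intro content _
  unfold Spec_remove_title_from_body remove_title_from_body remove_title_from_body_alt
  dsimp only
  rw [pv_fold_false]
  simp
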